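-- pv_equiv track=rewrite | github.com/aspirlidaki/privacyguard | core/patterns.py | validate_afm
-- ===== SOURCE A (Python) =====
-- def validate_afm(afm: str) -> bool:
--     """
--     Εκτελεί μαθηματική επαλήθευση Ελληνικού ΑΦΜ βάσει του αλγορίθμου Modulo 11.
--
--     Args:
--         afm (str): Το 9ψήφιο string προς έλεγχο.
--
--     Returns:
--         bool: True αν είναι έγκυρο, False αν είναι τυχαία νούμερα.
--     """
--     # Fail Fast: Αν δεν είναι 9 ψηφία, απορρίπτεται αμέσως.
--     if not afm.isdigit() or len(afm) != 9:
--         return False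
--
--     try:
--         # Μετατροπή string σε λίστα ακεραίων
--         digits = [int(d) for d in afm]
--
--         # --- MODULO 11 ALGORITHM ---
--         #  Πολλαπλασιασμός των 8 πρώτων ψηφίων με δυνάμεις του 2
--
--         sum_val = sum(digits[i] * (2**(8-i)) for i in range(8))
--
--         #  Υπολογισμός υπολοίπου
--         remainder = sum_val % 11
--
--         #  Κανονικοποίηση -Αν το υπόλοιπο είναι 10, το check digit γίνεται 0
--         check_digit = remainder % 10
--
--         # Σύγκριση με το 9ο ψηφίο ελέγχου
--         return check_digit == digits[8]
--
--     except Exception: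
--         # Σε περίπτωση κάποιου edge case, επιστρέφουμε False για Fail Safe
--         return False
-- ===== SOURCE B (Python) =====
-- def validate_afm(afm: str) -> bool:
--     if not afm.isdigit() or len(afm) != 9:
--         return False
--     try:
--         # Horner evaluation of the modulo-11 weighted sum: acc ends up equal to
--         # sum(d[i] * 2**(8-i) for i in range(8)) without computing any powers.
--         acc = 0
--         for ch in afm[:8]:
--             acc = acc * 2 + int(ch)
--         return (2 * acc % 11) % 10 == int(afm[8])
--     except Exception:
--         return False
-- ===== Notes on version B (the rewrite author's own statement) =====
-- stated objective: alternative
-- what changed: The weighted checksum sum(d[i]*2**(8-i)) is replaced by a single Horner-style accumulating pass acc = acc*2 + int(ch) over the first 8 characters, with no power terms and no index arithmetic.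
import Mathlib
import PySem

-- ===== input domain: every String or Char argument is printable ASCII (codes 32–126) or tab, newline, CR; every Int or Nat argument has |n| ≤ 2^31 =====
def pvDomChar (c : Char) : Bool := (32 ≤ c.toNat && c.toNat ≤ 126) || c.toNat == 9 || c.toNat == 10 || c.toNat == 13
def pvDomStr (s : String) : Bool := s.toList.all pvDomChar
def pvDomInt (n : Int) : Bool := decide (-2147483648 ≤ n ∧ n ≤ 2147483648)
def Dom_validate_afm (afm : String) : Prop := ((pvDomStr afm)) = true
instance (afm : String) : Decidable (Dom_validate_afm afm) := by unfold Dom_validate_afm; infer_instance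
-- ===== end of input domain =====

-- B replaces the power-and-sum checksum by a single Horner accumulating pass (alternative decomposition).

-- ===== PORT A =====
-- literal port: guard, int() on each character (none = ValueError → except → False),
-- weighted sum over range(8) with powers of 2, then (sum % 11) % 10 vs digits[8]
def validate_afm (afm : String) : Bool :=
  if !(PySem.Str.strIsdigit afm) || PySem.Str.len afm ≠ 9 then false
  else
    match afm.toList.mapM (fun d => PySem.Int.ofChars? [d]) with
    | none => false
    | some digits =>
      let sum_val : Int :=
        (PySem.List.pyRange 0 8 1).foldl
          (fun acc i => acc + PySem.List.pyGetD digits i 0 * 2 ^ (8 - i).toNat) 0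
      let remainder := PySem.Int.mod sum_val 11
      let check_digit := PySem.Int.mod remainder 10
      decide (check_digit = PySem.List.pyGetD digits 8 0)

-- ===== PORT B =====
-- literal port of Source B: same guard, then acc = acc*2 + int(ch) over afm[:8].
-- int(ch) is ported as code-48: after the isdigit guard every character is '0'..'9'
-- (PySem.Chars.isdigit is exactly '0' ≤ c ≤ '9'), so this is exact and the try never raises.
def validate_afm_alt (afm : String) : Bool :=
  if !(PySem.Str.strIsdigit afm) || PySem.Str.len afm ≠ 9 then false
  else
    let acc : Int :=
      (afm.toList.take 8).foldl (fun acc ch => acc * 2 + ((ch.toNat : Int) - 48)) 0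
    decide (PySem.Int.mod (PySem.Int.mod (2 * acc) 11) 10
              = ((afm.toList.getD 8 '0').toNat : Int) - 48)

-- ===== PRECONDITION & SPEC =====
def Spec_validate_afm (afm : String) (out : Bool) : Prop := out = validate_afm_alt afm
instance (afm : String) (out : Bool) : Decidable (Spec_validate_afm afm out) := by unfold Spec_validate_afm; infer_instance

-- ===== CLAIM (what is proved, stated in full; the proofs are below) =====
def Claim_equal_validate_afm : Prop := ∀ (afm : String), Dom_validate_afm afm → Spec_validate_afm afm (validate_afm afm)

-- ===== LEMMAS AND PROOFS =====

lemma digit_mem (c : Char) (h0 : '0' ≤ c) (h9 : c ≤ '9') :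
    c ∈ ['0','1','2','3','4','5','6','7','8','9'] := by
  have h0' : 48 ≤ c.toNat := by exact h0
  have h9' : c.toNat ≤ 57 := by exact h9
  rw [← Char.ofNat_toNat c]
  interval_cases c.toNat <;> decide

lemma digit_ofChars (c : Char) (h0 : '0' ≤ c) (h9 : c ≤ '9') :
    PySem.Int.ofChars? [c] = some ((c.toNat : Int) - 48) := by
  have := digit_mem c h0 h9
  fin_cases this <;> decide

-- ===== VERDICT (by name: the statement is the Claim_ definition above) =====
lemma exists_nine (l : List Char) (hlen : l.length = 9) :
    ∃ a b c d e f g h i, l = [a,b,c,d,e,f,g,h,i] := by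
  rcases l with _|⟨a,_|⟨b,_|⟨c,_|⟨d,_|⟨e,_|⟨f,_|⟨g,_|⟨h,_|⟨i,_|⟨j,t⟩⟩⟩⟩⟩⟩⟩⟩⟩⟩ <;>
    simp_all

theorem validate_afm_spec : Claim_equal_validate_afm := by
  intro afm _
  unfold Spec_validate_afm validate_afm validate_afm_alt
  by_cases hd : PySem.Str.strIsdigit afm = true
  · by_cases hl : PySem.Str.len afm = 9
    · have hlen : afm.toList.length = 9 := by
        have h := PySem.Str.len_eq afm; rw [h] at hl; exact_mod_cast hl
      have hall : ∀ c ∈ afm.toList, '0' ≤ c ∧ c ≤ '9' := by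
        rw [PySem.Str.strIsdigit_eq, PySem.Chars.strIsdigit] at hd
        intro c hc
        have h2 := (List.all_eq_true.mp (Bool.and_elim_right hd)) c hc
        simpa [PySem.Chars.isdigit] using h2
      obtain ⟨a0,a1,a2,a3,a4,a5,a6,a7,a8,hT⟩ := exists_nine afm.toList hlen
      have hr : PySem.List.pyRange 0 8 1 = [0,1,2,3,4,5,6,7] := by decide
      have d0 := digit_ofChars a0 (hall a0 (by rw [hT]; simp)).1 (hall a0 (by rw [hT]; simp)).2
      have d1 := digit_ofChars a1 (hall a1 (by rw [hT]; simp)).1 (hall a1 (by rw [hT]; simp)).2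
      have d2 := digit_ofChars a2 (hall a2 (by rw [hT]; simp)).1 (hall a2 (by rw [hT]; simp)).2
      have d3 := digit_ofChars a3 (hall a3 (by rw [hT]; simp)).1 (hall a3 (by rw [hT]; simp)).2
      have d4 := digit_ofChars a4 (hall a4 (by rw [hT]; simp)).1 (hall a4 (by rw [hT]; simp)).2
      have d5 := digit_ofChars a5 (hall a5 (by rw [hT]; simp)).1 (hall a5 (by rw [hT]; simp)).2
      have d6 := digit_ofChars a6 (hall a6 (by rw [hT]; simp)).1 (hall a6 (by rw [hT]; simp)).2
      have d7 := digit_ofChars a7 (hall a7 (by rw [hT]; simp)).1 (hall a7 (by rw [hT]; simp)).2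
      have d8 := digit_ofChars a8 (hall a8 (by rw [hT]; simp)).1 (hall a8 (by rw [hT]; simp)).2
      simp only [hT, hr, List.mapM_cons, List.mapM_nil, d0, d1, d2, d3, d4, d5, d6,
        d7, d8, Option.bind_eq_bind, Option.bind_some, Option.pure_def, List.foldl_cons,
        List.foldl_nil, List.take, List.getD]
      simp only [hd, hl, Bool.not_true, ne_eq, not_true_eq_false,
        decide_false, Bool.or_false, Bool.if_false_left]
      simp [PySem.List.pyGetD, PySem.List.pyGet?, PySem.List.pyIdx?]
      ring_nf
    · have hl' : ¬((afm.length : Int) = 9) := by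
        simpa [PySem.Str.len, String.length_toList] using hl
      simp [hl']
  · have hd' : PySem.Chars.strIsdigit afm.toList = false := by
      simpa [PySem.Str.strIsdigit] using hd
    simp [hd']
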